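-- pv_equiv track=rewrite | github.com/Vivek-88/LeetCode_POTD_Solution | 05Mar2024.py | minimumLength
-- ===== SOURCE A (Python) =====
-- def minimumLength(s: str) -> int:
--     i=0
--     j=len(s)-1
--     while(i<j) :
--         if(s[i]==s[j]) :
--             idx=i
--             while(i<j and s[idx]==s[i]) :
--                 i+=1
--             while(j>=i and s[idx]==s[j]) :
--                 j-=1
--         else :
--             break
--
--     return j-i+1
-- ===== SOURCE B (Python) =====
-- def minimumLength(s: str) -> int:
--     # Run-length encode the string once, then peel matching run pairs off the ends.
--     runs = []
--     for ch in s: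
--         if runs and runs[-1][0] == ch:
--             runs[-1] = (ch, runs[-1][1] + 1)
--         else:
--             runs.append((ch, 1))
--     while len(runs) >= 2 and runs[0][0] == runs[-1][0]:
--         runs = runs[1:-1]
--     if not runs:
--         return 0
--     if len(runs) == 1:
--         return 1 if runs[0][1] == 1 else 0
--     return sum(n for _, n in runs)
-- ===== Notes on version B (the rewrite author's own statement) =====
-- stated objective: alternative
-- what changed: Instead of A's two character-level pointers with hand-written inner counting loops, B run-length encodes the string once and then peels matching (same-character) run pairs off the two ends of the run list, deriving the answer from the surviving runs (empty -> 0, one run -> 1 or 0 by its length, else the sum of run lengths).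
import Mathlib
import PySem

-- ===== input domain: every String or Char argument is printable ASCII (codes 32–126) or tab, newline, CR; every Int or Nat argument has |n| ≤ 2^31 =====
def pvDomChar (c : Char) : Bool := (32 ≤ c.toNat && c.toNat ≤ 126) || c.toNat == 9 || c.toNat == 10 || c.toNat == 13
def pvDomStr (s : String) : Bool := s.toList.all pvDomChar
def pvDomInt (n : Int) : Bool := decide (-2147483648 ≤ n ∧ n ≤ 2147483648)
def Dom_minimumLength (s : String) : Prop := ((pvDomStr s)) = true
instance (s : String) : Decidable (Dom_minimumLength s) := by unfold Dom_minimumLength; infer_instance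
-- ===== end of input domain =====

-- B replaces A's character-level two-pointer scans by a different strategy: run-length encode
-- the string once, peel matching run PAIRS off the ends of the run list, and read the answer
-- off the surviving runs (alternative algorithm, same asymptotic cost).

-- ===== PORT A =====
-- Each while loop is ported as structural recursion on a fuel argument that only bounds the
-- iteration count (fuel = enough steps, supplied at the call site); the loop body is unchanged.

-- inner loop `while(i<j and s[idx]==s[i]): i+=1`  (c is the fixed character s[idx])
def pvA_scanLeft (l : List Char) (c : Char) : Nat → Int → Int → Int
  | 0, i, _ => i
  | fuel + 1, i, j =>
    if i < j ∧ PySem.List.pyGet? l i = some c then pvA_scanLeft l c fuel (i + 1) j else i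

-- inner loop `while(j>=i and s[idx]==s[j]): j-=1`
def pvA_scanRight (l : List Char) (c : Char) : Nat → Int → Int → Int
  | 0, _, j => j
  | fuel + 1, i, j =>
    if i ≤ j ∧ PySem.List.pyGet? l j = some c then pvA_scanRight l c fuel i (j - 1) else j

-- outer loop `while(i<j)` of A; the isSome guard only makes the indexing total — on every call
-- actually reached from `minimumLength` both indices are in range, exactly as in the Python.
def pvA_outer (l : List Char) : Nat → Int → Int → Int
  | 0, i, j => j - i + 1
  | fuel + 1, i, j =>
    if i < j then
      if hc : (PySem.List.pyGet? l i).isSome ∧ PySem.List.pyGet? l i = PySem.List.pyGet? l j then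
        pvA_outer l fuel (pvA_scanLeft l ((PySem.List.pyGet? l i).get hc.1) (j - i).toNat i j)
          (pvA_scanRight l ((PySem.List.pyGet? l i).get hc.1)
            (j - pvA_scanLeft l ((PySem.List.pyGet? l i).get hc.1) (j - i).toNat i j + 1).toNat
            (pvA_scanLeft l ((PySem.List.pyGet? l i).get hc.1) (j - i).toNat i j) j)
      else j - i + 1
    else j - i + 1

def minimumLength (s : String) : Int :=
  pvA_outer s.toList s.toList.length 0 (PySem.Str.len s - 1)

-- ===== PORT B =====
-- `runs[-1] = (ch, runs[-1][1] + 1)` / `runs.append((ch, 1))` — one step of the RLE-building loop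
def pvRleStep (runs : List (Char × Int)) (ch : Char) : List (Char × Int) :=
  match runs.getLast? with
  | some (d, n) => if d = ch then runs.dropLast ++ [(ch, n + 1)] else runs ++ [(ch, 1)]
  | none => [(ch, 1)]

-- `for ch in s: …` building the run-length encoding
def pvRuns (l : List Char) : List (Char × Int) := l.foldl pvRleStep []

-- `while len(runs) >= 2 and runs[0][0] == runs[-1][0]: runs = runs[1:-1]`
-- (structural recursion on a fuel bounding the iteration count; each step drops two runs)
def pvPeel : Nat → List (Char × Int) → List (Char × Int)
  | 0, runs => runs
  | fuel + 1, runs =>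
    if 2 ≤ runs.length ∧
        (PySem.List.pyGet? runs 0).map Prod.fst = (PySem.List.pyGet? runs (-1)).map Prod.fst then
      pvPeel fuel (PySem.List.slice runs (some 1) (some (-1)))
    else runs

def minimumLength_alt (s : String) : Int :=
  let runs := pvPeel (pvRuns s.toList).length (pvRuns s.toList)
  if runs.isEmpty then 0
  else if runs.length = 1 then (if (runs.headD default).2 = 1 then 1 else 0)
  else (runs.map Prod.snd).sum

-- ===== PRECONDITION & SPEC =====
def Spec_minimumLength (s : String) (out : Int) : Prop := out = minimumLength_alt s
instance (s : String) (out : Int) : Decidable (Spec_minimumLength s out) := by unfold Spec_minimumLength; infer_instance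

-- ===== CLAIM (what is proved, stated in full; the proofs are below) =====
def Claim_equal_minimumLength : Prop := ∀ (s : String), Dom_minimumLength s → Spec_minimumLength s (minimumLength s)

-- ===== LEMMAS AND PROOFS =====

-- a fueled loop that fails its guard returns immediately, whatever the fuel
theorem pvA_scanRight_stop (l : List Char) (c : Char) (fuel : Nat) (i j : Int)
    (h : ¬ (i ≤ j ∧ PySem.List.pyGet? l j = some c)) : pvA_scanRight l c fuel i j = j := by
  cases fuel with
  | zero => rfl
  | succ n => exact if_neg h

theorem pvA_outer_stop (l : List Char) (fuel : Nat) (i j : Int) (h : ¬ i < j) :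
    pvA_outer l fuel i j = j - i + 1 := by
  cases fuel with
  | zero => rfl
  | succ n =>
    rw [show pvA_outer l (n + 1) i j
        = if i < j then _ else j - i + 1 from rfl, if_neg h]

-- runs[1:-1] is tail.dropLast (exact for every list)
theorem pv_slice_one_neg_one {α : Type} (r : List α) :
    PySem.List.slice r (some 1) (some (-1)) = r.tail.dropLast := by
  simp [PySem.List.slice, PySem.List.clampIdx]
  cases r with
  | nil => simp
  | cons x t =>
    simp only [if_neg (List.cons_ne_nil x t), List.length_cons]
    rw [show ((((t.length + 1 : Nat) : Int)) + -1).toNat = t.length from by omega,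
      show min 1 (t.length + 1) = 1 from by omega]
    simp [List.dropLast_eq_take]

theorem pv_len_dropWhile_le (p : Char → Bool) (xs : List Char) :
    (xs.dropWhile p).length ≤ xs.length := by
  have h := congrArg List.length (List.takeWhile_append_dropWhile (p := p) (l := xs))
  simp only [List.length_append] at h
  omega

theorem pvB_strip_length_lt (l : List Char) (hl : 1 < l.length) :
    (PySem.Chars.stripChars l [l.headD ' ']).length < l.length := by
  cases l with
  | nil => simp at hl
  | cons x t =>
    simp only [PySem.Chars.stripChars, List.headD_cons]
    have hx : [x].contains x = true := by simp
    rw [List.dropWhile_cons, if_pos hx]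
    simp only [List.length_reverse, List.length_cons]
    have h1 := pv_len_dropWhile_le (fun c => [x].contains c) t
    have h2 := pv_len_dropWhile_le (fun c => [x].contains c)
      (List.dropWhile (fun c => [x].contains c) t).reverse
    simp only [List.length_reverse] at h2
    omega

-- proof-side reference loop: "while the string's ends match, strip that character"; it serves
-- as the middle term between A's window recursion and B's run peeling
def pvB_loop (l : List Char) : List Char :=
  if _h : 1 < l.length ∧ PySem.List.pyGet? l 0 = PySem.List.pyGet? l (-1) then
    pvB_loop (PySem.Chars.stripChars l [l.headD ' '])
  else l
termination_by l.length
decreasing_by exact pvB_strip_length_lt l _h.1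

theorem pv_dropWhile_eq_drop (p : Char → Bool) (xs : List Char) :
    xs.dropWhile p = xs.drop (xs.takeWhile p).length := by
  calc xs.dropWhile p
      = (xs.takeWhile p ++ xs.dropWhile p).drop (xs.takeWhile p).length := (List.drop_left).symm
    _ = xs.drop (xs.takeWhile p).length := by rw [List.takeWhile_append_dropWhile]

theorem pv_len_takeWhile_le (p : Char → Bool) (xs : List Char) :
    (xs.takeWhile p).length ≤ xs.length := by
  have h := congrArg List.length (List.takeWhile_append_dropWhile (p := p) (l := xs))
  simp only [List.length_append] at h
  omega

theorem pv_takeWhile_getElem_false (p : Char → Bool) (xs : List Char) (n : Nat)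
    (h : (xs.takeWhile p).length = n) (hlt : n < xs.length) :
    p (xs[n]'hlt) = false := by
  induction xs generalizing n with
  | nil => simp at hlt
  | cons x t ih =>
    by_cases hx : p x
    · rw [List.takeWhile_cons_of_pos hx] at h
      cases n with
      | zero => simp at h
      | succ m =>
        have hm : (t.takeWhile p).length = m := by simpa using h
        simpa using ih m hm (by simpa using hlt)
    · rw [List.takeWhile_cons_of_neg hx] at h
      have h0 : n = 0 := by simpa using h.symm
      subst h0
      simpa using hx

theorem pv_takeWhile_append_left (p : Char → Bool) (xs ys : List Char)
    (h : (xs.takeWhile p).length < xs.length) :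
    (xs ++ ys).takeWhile p = xs.takeWhile p := by
  induction xs with
  | nil => simp at h
  | cons x t ih =>
    by_cases hx : p x
    · rw [List.takeWhile_cons_of_pos hx] at h ⊢
      rw [List.cons_append, List.takeWhile_cons_of_pos hx, ih (by simpa using h)]
    · rw [List.cons_append, List.takeWhile_cons_of_neg hx, List.takeWhile_cons_of_neg hx]

theorem pv_takeWhile_all (p : Char → Bool) (xs : List Char)
    (h : (xs.takeWhile p).length = xs.length) : xs.takeWhile p = xs :=
  (List.takeWhile_prefix p).eq_of_length h

-- pvA_scanLeft = i plus the length of the run of c's at the front of s[i:j]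
theorem pvA_scanLeft_spec (l : List Char) (c : Char) :
    ∀ (fuel a b : Nat), b - a ≤ fuel → a ≤ b → b ≤ l.length →
    pvA_scanLeft l c fuel a b
      = (a : Int) + (((l.drop a).take (b - a)).takeWhile (· == c)).length := by
  intro n
  induction n with
  | zero =>
    intro a b h hab hb
    rw [show pvA_scanLeft l c 0 (a : Int) (b : Int) = (a : Int) from rfl]
    rw [show b - a = 0 from by omega, List.take_zero]
    simp
  | succ n ih =>
    intro a b h hab hb
    rw [show pvA_scanLeft l c (n + 1) (a : Int) (b : Int)
        = if (a : Int) < (b : Int) ∧ PySem.List.pyGet? l (a : Int) = some c then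
            pvA_scanLeft l c n ((a : Int) + 1) (b : Int)
          else (a : Int) from rfl]
    by_cases he : a = b
    · rw [if_neg (by rintro ⟨h1, _⟩; omega)]
      rw [show b - a = 0 from by omega, List.take_zero]
      simp
    · have hlt : a < b := by omega
      have hal : a < l.length := by omega
      have hget : PySem.List.pyGet? l (a : Int) = some (l[a]'hal) := by
        rw [PySem.List.pyGet?_natCast, List.getElem?_eq_getElem hal]
      have hseg : (l.drop a).take (b - a) = l[a]'hal :: ((l.drop (a + 1)).take (b - (a + 1))) := by
        rw [List.drop_eq_getElem_cons hal, show b - a = (b - (a + 1)) + 1 from by omega,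
          List.take_succ_cons]
      by_cases hc : l[a]'hal = c
      · rw [if_pos ⟨by exact_mod_cast hlt, by rw [hget, hc]⟩]
        rw [show ((a : Int) + 1) = ((a + 1 : Nat) : Int) from by push_cast; ring]
        rw [ih (a + 1) b (by omega) (by omega) hb]
        rw [hseg, List.takeWhile_cons_of_pos (by simp [hc])]
        simp only [List.length_cons]
        push_cast; ring
      · rw [if_neg (by rintro ⟨h1, h2⟩; rw [hget] at h2; exact hc (by simpa using h2))]
        rw [hseg, List.takeWhile_cons_of_neg (by simp [hc])]
        simp

-- pvA_scanRight = j minus the length of the run of c's at the back of s[a:j+1]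
theorem pvA_scanRight_spec (l : List Char) (c : Char) :
    ∀ (fuel a b : Nat), b + 1 - a ≤ fuel → a ≤ b + 1 → b < l.length →
    pvA_scanRight l c fuel a b
      = (b : Int) - (((l.drop a).take (b + 1 - a)).reverse.takeWhile (· == c)).length := by
  intro n
  induction n with
  | zero =>
    intro a b h hab hb
    rw [show pvA_scanRight l c 0 (a : Int) (b : Int) = (b : Int) from rfl]
    rw [show b + 1 - a = 0 from by omega, List.take_zero]
    simp
  | succ n ih =>
    intro a b h hab hb
    rw [show pvA_scanRight l c (n + 1) (a : Int) (b : Int)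
        = if (a : Int) ≤ (b : Int) ∧ PySem.List.pyGet? l (b : Int) = some c then
            pvA_scanRight l c n (a : Int) ((b : Int) - 1)
          else (b : Int) from rfl]
    by_cases he : a = b + 1
    · rw [if_neg (by rintro ⟨h1, _⟩; omega)]
      rw [show b + 1 - a = 0 from by omega, List.take_zero]
      simp
    · have hle : a ≤ b := by omega
      have hget : PySem.List.pyGet? l (b : Int) = some (l[b]'hb) := by
        rw [PySem.List.pyGet?_natCast, List.getElem?_eq_getElem hb]
      have hseg : (l.drop a).take (b + 1 - a) = (l.drop a).take (b - a) ++ [l[b]'hb] := by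
        rw [show b + 1 - a = (b - a) + 1 from by omega, List.take_add_one]
        congr 1
        rw [List.getElem?_drop, show a + (b - a) = b from by omega, List.getElem?_eq_getElem hb]
        simp
      have hrev : ((l.drop a).take (b + 1 - a)).reverse
          = l[b]'hb :: ((l.drop a).take (b - a)).reverse := by
        rw [hseg]; simp
      by_cases hc : l[b]'hb = c
      · rw [if_pos ⟨by exact_mod_cast hle, by rw [hget, hc]⟩]
        by_cases he2 : a = b
        · rw [pvA_scanRight_stop l c n (a : Int) ((b : Int) - 1)
            (by rintro ⟨h1, _⟩; omega)]
          rw [hrev, List.takeWhile_cons_of_pos (by simp [hc]), show b - a = 0 from by omega,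
            List.take_zero]
          simp
        · rw [show ((b : Int) - 1) = ((b - 1 : Nat) : Int) from by omega]
          rw [ih a (b - 1) (by omega) (by omega) (by omega)]
          rw [show b - 1 + 1 - a = b - a from by omega]
          rw [hrev, List.takeWhile_cons_of_pos (by simp [hc]), List.length_cons]
          push_cast
          omega
      · rw [if_neg (by rintro ⟨h1, h2⟩; rw [hget] at h2; exact hc (by simpa using h2))]
        rw [hrev, List.takeWhile_cons_of_neg (by simp [hc])]
        simp

-- the joint invariant: A's remaining window s[a:b+1] is exactly the reference loop's string
theorem pv_main (l : List Char) :
    ∀ (fuel a b : Nat), b - a ≤ fuel → a ≤ b + 1 → b < l.length →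
    pvA_outer l fuel a b = ((pvB_loop ((l.drop a).take (b + 1 - a))).length : Int) := by
  intro n
  induction n with
  | zero =>
    intro a b h hab hb
    by_cases he1 : a = b
    · subst he1
      rw [pvA_outer_stop l 0 (a : Int) (a : Int) (by omega)]
      have hal : a < l.length := hb
      rw [show a + 1 - a = 1 from by omega, List.drop_eq_getElem_cons hal,
        show (1 : Nat) = 0 + 1 from rfl, List.take_succ_cons, List.take_zero]
      rw [pvB_loop, dif_neg (by rintro ⟨h1, _⟩; simp at h1)]
      simp only [List.length_cons, List.length_nil]
      omega
    · have he0 : a = b + 1 := by omega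
      rw [pvA_outer_stop l 0 (a : Int) (b : Int) (by omega)]
      rw [show b + 1 - a = 0 from by omega, List.take_zero, pvB_loop, dif_neg (by simp)]
      simp only [List.length_nil, Nat.cast_zero]
      omega
  | succ n ih =>
    intro a b h hab hb
    by_cases he0 : a = b + 1
    · rw [pvA_outer_stop l (n + 1) (a : Int) (b : Int) (by omega)]
      rw [show b + 1 - a = 0 from by omega, List.take_zero, pvB_loop, dif_neg (by simp)]
      simp only [List.length_nil, Nat.cast_zero]
      omega
    · by_cases he1 : a = b
      · subst he1
        rw [pvA_outer_stop l (n + 1) (a : Int) (a : Int) (by omega)]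
        have hal : a < l.length := hb
        rw [show a + 1 - a = 1 from by omega, List.drop_eq_getElem_cons hal,
          show (1 : Nat) = 0 + 1 from rfl, List.take_succ_cons, List.take_zero]
        rw [pvB_loop, dif_neg (by rintro ⟨h1, _⟩; simp at h1)]
        simp only [List.length_cons, List.length_nil]
        omega
      · have hlt : a < b := by omega
        have hal : a < l.length := by omega
        have hbl : b < l.length := hb
        have hgeta : PySem.List.pyGet? l (a : Int) = some (l[a]'hal) := by
          rw [PySem.List.pyGet?_natCast, List.getElem?_eq_getElem hal]
        have hgetb : PySem.List.pyGet? l (b : Int) = some (l[b]'hbl) := by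
          rw [PySem.List.pyGet?_natCast, List.getElem?_eq_getElem hbl]
        have hseg : (l.drop a).take (b + 1 - a) = (l.drop a).take (b - a) ++ [l[b]'hbl] := by
          rw [show b + 1 - a = (b - a) + 1 from by omega, List.take_add_one]
          congr 1
          rw [List.getElem?_drop, show a + (b - a) = b from by omega, List.getElem?_eq_getElem hbl]
          simp
        have hcons : (l.drop a).take (b + 1 - a) = l[a]'hal :: ((l.drop (a + 1)).take (b - a)) := by
          rw [List.drop_eq_getElem_cons hal, show b + 1 - a = (b - a) + 1 from by omega,
            List.take_succ_cons]
        have hm0 : PySem.List.pyGet? ((l.drop a).take (b + 1 - a)) 0 = some (l[a]'hal) := by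
          rw [hcons]; exact PySem.List.pyGet?_zero_cons _ _
        have hm1 : PySem.List.pyGet? ((l.drop a).take (b + 1 - a)) (-1) = some (l[b]'hbl) := by
          rw [hseg]; exact PySem.List.pyGet?_neg_one_append_singleton _ _
        have hmlen : ((l.drop a).take (b + 1 - a)).length = b + 1 - a := by
          rw [List.length_take, List.length_drop]; omega
        have hlen' : ((l.drop a).take (b - a)).length = b - a := by
          rw [List.length_take, List.length_drop]; omega
        rw [show pvA_outer l (n + 1) (a : Int) (b : Int)
            = if (a : Int) < (b : Int) then
                if hc : (PySem.List.pyGet? l (a : Int)).isSome ∧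
                    PySem.List.pyGet? l (a : Int) = PySem.List.pyGet? l (b : Int) then
                  pvA_outer l n
                    (pvA_scanLeft l ((PySem.List.pyGet? l (a : Int)).get hc.1)
                      ((b : Int) - (a : Int)).toNat (a : Int) (b : Int))
                    (pvA_scanRight l ((PySem.List.pyGet? l (a : Int)).get hc.1)
                      ((b : Int) - pvA_scanLeft l ((PySem.List.pyGet? l (a : Int)).get hc.1)
                          ((b : Int) - (a : Int)).toNat (a : Int) (b : Int) + 1).toNat
                      (pvA_scanLeft l ((PySem.List.pyGet? l (a : Int)).get hc.1)
                        ((b : Int) - (a : Int)).toNat (a : Int) (b : Int)) (b : Int))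
                else (b : Int) - (a : Int) + 1
              else (b : Int) - (a : Int) + 1 from rfl]
        rw [if_pos (show (a : Int) < (b : Int) by exact_mod_cast hlt)]
        by_cases hcc : l[a]'hal = l[b]'hbl
        · have hsome : (PySem.List.pyGet? l (a : Int)).isSome := by rw [hgeta]; rfl
          rw [dif_pos ⟨hsome, by rw [hgeta, hgetb, hcc]⟩]
          simp only [hgeta, Option.get_some]
          rw [pvB_loop, dif_pos ⟨by rw [hmlen]; omega, by rw [hm0, hm1, hcc]⟩]
          have hhead : ((l.drop a).take (b + 1 - a)).headD ' ' = l[a]'hal := by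
            rw [hcons]; exact List.headD_cons
          rw [hhead]
          have hp : (fun x => ([l[a]'hal].contains x)) = (fun x => x == l[a]'hal) := by
            funext x
            by_cases hxe : x = l[a]'hal <;> simp [hxe]
          rw [show ((b : Int) - (a : Int)).toNat = b - a from by omega]
          have hsl := pvA_scanLeft_spec l (l[a]'hal) (b - a) a b (by omega) (by omega) (by omega)
          set t1 : Nat := (((l.drop a).take (b - a)).takeWhile (· == l[a]'hal)).length with ht1_def
          have ht1le : t1 ≤ b - a := by
            have := pv_len_takeWhile_le (· == l[a]'hal) ((l.drop a).take (b - a))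
            omega
          by_cases hdeg : t1 = b - a
          · -- degenerate: the whole window is one run of c; strip empties it, A crosses to 0
            have hslb : pvA_scanLeft l (l[a]'hal) (b - a) (a : Int) (b : Int) = (b : Int) := by
              rw [hsl]; omega
            have hall : ∀ x ∈ (l.drop a).take (b - a), (x == l[a]'hal) = true := by
              intro x hx
              have heq : ((l.drop a).take (b - a)).takeWhile (· == l[a]'hal)
                  = (l.drop a).take (b - a) := by
                apply pv_takeWhile_all
                omega
              have hx2 : x ∈ List.takeWhile (fun y => y == l[a]'hal)
                  ((l.drop a).take (b - a)) := by rw [heq]; exact hx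
              have hpx := List.mem_takeWhile_imp hx2
              exact hpx
            rw [hslb, show ((b : Int) - (b : Int) + 1).toNat = 1 from by omega]
            have hsr := pvA_scanRight_spec l (l[a]'hal) 1 b b (by omega) (by omega) hbl
            have hsrb : pvA_scanRight l (l[a]'hal) 1 (b : Int) (b : Int) = (b : Int) - 1 := by
              rw [hsr]
              have hone : (l.drop b).take (b + 1 - b) = [l[b]'hbl] := by
                rw [show b + 1 - b = 1 from by omega, List.drop_eq_getElem_cons hbl,
                  show (1 : Nat) = 0 + 1 from rfl, List.take_succ_cons, List.take_zero]
              rw [hone]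
              simp [hcc]
            rw [hsrb]
            rw [pvA_outer_stop l n (b : Int) ((b : Int) - 1) (by omega)]
            have hstrip : PySem.Chars.stripChars ((l.drop a).take (b + 1 - a)) [l[a]'hal] = [] := by
              simp only [PySem.Chars.stripChars]
              have hdw : List.dropWhile (fun x => [l[a]'hal].contains x)
                  ((l.drop a).take (b + 1 - a)) = [] := by
                rw [List.dropWhile_eq_nil_iff]
                intro x hx
                rw [hseg] at hx
                rcases List.mem_append.mp hx with hx | hx
                · simpa using hall x hx
                · simp only [List.mem_singleton] at hx
                  subst hx
                  simp [hcc]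
              rw [hdw]
              simp
            rw [hstrip, pvB_loop, dif_neg (by simp)]
            simp only [List.length_nil, Nat.cast_zero]
            omega
          · -- non-degenerate: the strip stops inside the window
            have ht1lt : t1 < b - a := by omega
            set a2 : Nat := a + t1 with ha2_def
            have ha2b : a2 < b := by omega
            have ha2l : a2 < l.length := by omega
            have ht1pos : 1 ≤ t1 := by
              rw [ht1_def]
              obtain ⟨k, hk⟩ : ∃ k, b - a = k + 1 := ⟨b - a - 1, by omega⟩
              rw [hk, List.drop_eq_getElem_cons hal, List.take_succ_cons,
                List.takeWhile_cons_of_pos (by simp), List.length_cons]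
              omega
            have hfail : (l[a2]'ha2l == l[a]'hal) = false := by
              have hgf := pv_takeWhile_getElem_false (· == l[a]'hal) ((l.drop a).take (b - a))
                t1 ht1_def.symm (by omega)
              rw [List.getElem_take, List.getElem_drop] at hgf
              simpa [ha2_def] using hgf
            have hsla : pvA_scanLeft l (l[a]'hal) (b - a) (a : Int) (b : Int) = (a2 : Int) := by
              rw [hsl]; omega
            rw [hsla, show ((b : Int) - (a2 : Int) + 1).toNat = b + 1 - a2 from by omega]
            have hsr := pvA_scanRight_spec l (l[a]'hal) (b + 1 - a2) a2 b (by omega) (by omega) hbl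
            set d1 : List Char := (l.drop a2).take (b + 1 - a2) with hd1_def
            set t2 : Nat := (d1.reverse.takeWhile (· == l[a]'hal)).length with ht2_def
            have hd1len : d1.length = b + 1 - a2 := by
              rw [hd1_def, List.length_take, List.length_drop]; omega
            have hd1cons : d1 = l[a2]'ha2l :: ((l.drop (a2 + 1)).take (b - a2)) := by
              rw [hd1_def, List.drop_eq_getElem_cons ha2l,
                show b + 1 - a2 = (b - a2) + 1 from by omega, List.take_succ_cons]
            have ht2le : t2 ≤ b - a2 := by
              by_contra hcon
              have hb1 : t2 ≤ d1.reverse.length := pv_len_takeWhile_le _ _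
              rw [List.length_reverse] at hb1
              have ht2eq : t2 = b + 1 - a2 := by omega
              have hrall : d1.reverse.takeWhile (· == l[a]'hal) = d1.reverse := by
                apply pv_takeWhile_all
                rw [List.length_reverse]
                omega
              have hmem : l[a2]'ha2l ∈ d1.reverse := by
                rw [List.mem_reverse, hd1cons]; exact List.mem_cons_self
              have := List.mem_takeWhile_imp (hrall.symm ▸ hmem)
              rw [hfail] at this
              exact Bool.false_ne_true this
            rw [hsr]
            rw [show ((b : Int) - (t2 : Int)) = ((b - t2 : Nat) : Int) from by omega]
            rw [ih a2 (b - t2) (by omega) (by omega) (by omega)]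
            have hstrip : PySem.Chars.stripChars ((l.drop a).take (b + 1 - a)) [l[a]'hal]
                = (l.drop a2).take (b - t2 + 1 - a2) := by
              simp only [PySem.Chars.stripChars]
              rw [hp]
              have htw : ((l.drop a).take (b + 1 - a)).takeWhile (· == l[a]'hal)
                  = ((l.drop a).take (b - a)).takeWhile (· == l[a]'hal) := by
                rw [hseg]
                exact pv_takeWhile_append_left _ _ _ (by omega)
              have hdw : List.dropWhile (fun x => x == l[a]'hal) ((l.drop a).take (b + 1 - a))
                  = d1 := by
                rw [pv_dropWhile_eq_drop, htw, ← ht1_def, List.drop_take, List.drop_drop,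
                  show b + 1 - a - t1 = b + 1 - a2 from by omega, hd1_def]
              rw [hdw, pv_dropWhile_eq_drop, ← ht2_def, List.drop_reverse, List.reverse_reverse]
              rw [hd1len, hd1_def, List.take_take,
                show min (b + 1 - a2 - t2) (b + 1 - a2) = b - t2 + 1 - a2 from by omega]
            rw [hstrip]
        · rw [dif_neg (by rintro ⟨_, h2⟩; rw [hgeta, hgetb] at h2; exact hcc (by simpa using h2))]
          rw [pvB_loop, dif_neg (by rintro ⟨_, h2⟩; rw [hm0, hm1] at h2; exact hcc (by simpa using h2))]
          rw [hmlen]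
          omega

-- A's port equals the reference strip loop's final length
theorem pv_A_eq_loop (s : String) :
    minimumLength s = ((pvB_loop s.toList).length : Int) := by
  unfold minimumLength
  rw [PySem.Str.len_eq]
  cases hl : s.toList with
  | nil =>
    simp only [List.length_nil, Nat.cast_zero]
    rw [pvA_outer_stop [] 0 0 (0 - 1) (by norm_num), pvB_loop, dif_neg (by simp)]
    simp
  | cons x t =>
    have h := pv_main (x :: t) (t.length + 1) 0 t.length (by omega) (by omega) (by simp)
    simp only [Nat.cast_zero, List.drop_zero, Nat.sub_zero] at h
    rw [show ((List.length (x :: t) : Int) - 1) = ((t.length : Nat) : Int) from by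
      simp [List.length_cons]]
    rw [show (x :: t).length = t.length + 1 from by simp]
    rw [show (x :: t).take (t.length + 1) = x :: t from by
      simp [List.take_succ_cons]] at h
    exact h

-- ===== RLE machinery for the B side =====

-- the character string an RLE list denotes
def pvFlat (r : List (Char × Int)) : List Char :=
  r.flatMap (fun p => List.replicate p.2.toNat p.1)

-- well-formed RLE: positive counts, adjacent runs carry different characters
def pvGood (r : List (Char × Int)) : Prop :=
  (∀ p ∈ r, 1 ≤ p.2) ∧ List.IsChain (· ≠ ·) (r.map Prod.fst)

theorem pvFlat_append (r1 r2 : List (Char × Int)) :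
    pvFlat (r1 ++ r2) = pvFlat r1 ++ pvFlat r2 := by
  simp [pvFlat]

theorem pvFlat_cons (p : Char × Int) (r : List (Char × Int)) :
    pvFlat (p :: r) = List.replicate p.2.toNat p.1 ++ pvFlat r := by
  simp [pvFlat]

-- pvRuns builds a well-formed RLE of its input
theorem pvRuns_spec (l : List Char) : pvGood (pvRuns l) ∧ pvFlat (pvRuns l) = l := by
  induction l using List.reverseRecOn with
  | nil =>
    refine ⟨⟨by simp [pvRuns], ?_⟩, by simp [pvRuns, pvFlat]⟩
    simp only [pvRuns, List.foldl_nil, List.map_nil]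
    exact List.isChain_nil
  | append_singleton l c ih =>
    obtain ⟨⟨hpos, hchain⟩, hflat⟩ := ih
    have hstep : pvRuns (l ++ [c]) = pvRleStep (pvRuns l) c := by
      simp [pvRuns, List.foldl_append]
    rw [hstep]
    cases hlast : (pvRuns l).getLast? with
    | none =>
      have hred : pvRleStep (pvRuns l) c = [(c, 1)] := by
        unfold pvRleStep
        rw [hlast]
      rw [hred]
      have hnil : pvRuns l = [] := List.getLast?_eq_none_iff.mp hlast
      have hleq : l = [] := by
        rw [hnil] at hflat
        simpa [pvFlat] using hflat.symm
      subst hleq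
      refine ⟨⟨by simp, by simp only [List.map_cons, List.map_nil]; exact List.isChain_singleton c⟩, ?_⟩
      simp [pvFlat]
    | some p =>
      obtain ⟨d, n⟩ := p
      have hred : pvRleStep (pvRuns l) c
          = if d = c then (pvRuns l).dropLast ++ [(c, n + 1)] else pvRuns l ++ [(c, 1)] := by
        unfold pvRleStep
        rw [hlast]
      rw [hred]
      obtain ⟨r', hr'⟩ := List.getLast?_eq_some_iff.mp hlast
      have hdrop : (pvRuns l).dropLast = r' := by rw [hr']; simp
      have hn1 : 1 ≤ n := hpos (d, n) (by rw [hr']; simp)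
      by_cases hdc : d = c
      · rw [if_pos hdc]
        subst hdc
        constructor
        · constructor
          · intro p hp
            rw [hdrop] at hp
            rcases List.mem_append.mp hp with hp | hp
            · exact hpos p (by rw [hr']; exact List.mem_append.mpr (Or.inl hp))
            · simp only [List.mem_singleton] at hp
              subst hp
              omega
          · have : (((pvRuns l).dropLast ++ [(d, n + 1)]).map Prod.fst)
                = ((pvRuns l).map Prod.fst) := by
              rw [hdrop, hr']
              simp
            rw [this]
            exact hchain
        · rw [hdrop, pvFlat_append, ← hflat, hr', pvFlat_append, List.append_assoc]
          congr 1
          have h1 : (n + 1).toNat = n.toNat + 1 := by omega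
          simp only [pvFlat, List.flatMap_cons, List.flatMap_nil, List.append_nil, h1]
          rw [List.replicate_succ']
      · rw [if_neg hdc]
        constructor
        · constructor
          · intro p hp
            rcases List.mem_append.mp hp with hp | hp
            · exact hpos p hp
            · simp only [List.mem_singleton] at hp
              subst hp
              omega
          · rw [List.map_append]
            rw [List.isChain_append]
            refine ⟨hchain, by simp, ?_⟩
            intro x hx y hy
            rw [hr'] at hx
            simp at hx hy
            subst hy
            rw [← hx]
            exact hdc
        · rw [pvFlat_append, hflat]
          simp [pvFlat]

-- the sum of the (positive) counts is the length of the denoted string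
theorem pv_sum_eq_len (r : List (Char × Int)) (hpos : ∀ p ∈ r, 1 ≤ p.2) :
    (r.map Prod.snd).sum = ((pvFlat r).length : Int) := by
  induction r with
  | nil => simp [pvFlat]
  | cons p t ih =>
    have hp1 : 1 ≤ p.2 := hpos p List.mem_cons_self
    rw [pvFlat_cons]
    simp only [List.map_cons, List.sum_cons, List.length_append, List.length_replicate]
    rw [ih (fun q hq => hpos q (List.mem_cons_of_mem p hq))]
    omega

-- stripping the shared end character from  c^a ++ mid ++ c^b  leaves exactly mid
theorem pv_strip_runs (c : Char) (a b : Nat) (mid : List (Char × Int))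
    (hpos : ∀ p ∈ mid, 1 ≤ p.2)
    (hhead : ∀ x ∈ (mid.map Prod.fst).head?, x ≠ c)
    (hlast : ∀ x ∈ (mid.map Prod.fst).getLast?, x ≠ c) :
    PySem.Chars.stripChars (List.replicate a c ++ (pvFlat mid ++ List.replicate b c)) [c]
      = pvFlat mid := by
  have hp : (fun x => ([c].contains x)) = (fun x => x == c) := by
    funext x
    by_cases hxe : x = c <;> simp [hxe]
  have hdropRepl : ∀ k : Nat, List.dropWhile (fun x => x == c) (List.replicate k c) = [] := by
    intro k
    rw [List.dropWhile_eq_nil_iff]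
    intro x hx
    simp [List.eq_of_mem_replicate hx]
  simp only [PySem.Chars.stripChars, hp]
  rw [List.dropWhile_append, hdropRepl a]
  simp only [List.isEmpty_nil, if_true]
  cases hm : mid with
  | nil =>
    simp only [pvFlat, List.flatMap_nil, List.nil_append]
    rw [hdropRepl b]
    simp
  | cons q mid' =>
    obtain ⟨c1, n1⟩ := q
    have hn1 : 1 ≤ n1 := hpos (c1, n1) (by rw [hm]; exact List.mem_cons_self)
    have hc1 : c1 ≠ c := by
      apply hhead
      rw [hm]
      simp
    obtain ⟨k1, hk1⟩ : ∃ k1, n1.toNat = k1 + 1 := ⟨n1.toNat - 1, by omega⟩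
    have hflatcons : pvFlat mid = c1 :: (List.replicate k1 c1 ++ pvFlat mid') := by
      rw [hm, pvFlat_cons]
      simp only [hk1, List.replicate_succ]
      simp
    rw [← hm, hflatcons, List.cons_append, List.dropWhile_cons_of_neg (by simp [hc1]),
      ← List.cons_append, ← hflatcons]
    rw [List.reverse_append, List.reverse_replicate, List.dropWhile_append, hdropRepl b]
    simp only [List.isEmpty_nil, if_true]
    -- now strip the reversed middle: its first element is mid's last character ≠ c
    rcases (show mid = [] ∨ ∃ mid'' q2, mid = mid'' ++ [q2] by
        simpa [List.concat_eq_append] using mid.eq_nil_or_concat) with hm2 | ⟨mid'', q2, hm2⟩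
    · rw [hm2] at hm
      simp at hm
    · obtain ⟨c2, n2⟩ := q2
      have hn2 : 1 ≤ n2 := hpos (c2, n2) (by rw [hm2]; simp)
      have hc2 : c2 ≠ c := by
        apply hlast
        rw [hm2]
        simp
      obtain ⟨k2, hk2⟩ : ∃ k2, n2.toNat = k2 + 1 := ⟨n2.toNat - 1, by omega⟩
      have hrevcons : (pvFlat mid).reverse
          = c2 :: (List.replicate k2 c2 ++ (pvFlat mid'').reverse) := by
        rw [hm2, pvFlat_append]
        simp only [pvFlat, List.flatMap_cons, List.flatMap_nil, List.append_nil]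
        rw [List.reverse_append, List.reverse_replicate, hk2, List.replicate_succ]
        simp
      rw [hrevcons, List.dropWhile_cons_of_neg (by simp [hc2]), ← hrevcons,
        List.reverse_reverse]

-- fueled peel loop: guard-failure and step lemmas
theorem pvPeel_stop (fuel : Nat) (runs : List (Char × Int))
    (h : ¬ (2 ≤ runs.length ∧
      (PySem.List.pyGet? runs 0).map Prod.fst = (PySem.List.pyGet? runs (-1)).map Prod.fst)) :
    pvPeel fuel runs = runs := by
  cases fuel with
  | zero => rfl
  | succ n => exact if_neg h

theorem pvPeel_step (fuel : Nat) (runs : List (Char × Int))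
    (h : 2 ≤ runs.length ∧
      (PySem.List.pyGet? runs 0).map Prod.fst = (PySem.List.pyGet? runs (-1)).map Prod.fst) :
    pvPeel (fuel + 1) runs = pvPeel fuel (PySem.List.slice runs (some 1) (some (-1))) :=
  if_pos h

-- the reference strip loop computed through the RLE: one strip step = dropping the end run pair
theorem pv_bridge : ∀ (k : Nat) (r : List (Char × Int)), r.length ≤ k → pvGood r →
    ((pvB_loop (pvFlat r)).length : Int)
      = (if (pvPeel k r).isEmpty then 0
         else if (pvPeel k r).length = 1 then (if ((pvPeel k r).headD default).2 = 1 then 1 else 0)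
         else ((pvPeel k r).map Prod.snd).sum) := by
  intro k
  induction k with
  | zero =>
    intro r hk _
    have hr : r = [] := List.eq_nil_of_length_eq_zero (by omega)
    subst hr
    rw [show pvPeel 0 ([] : List (Char × Int)) = [] from rfl]
    simp only [pvFlat, List.flatMap_nil]
    rw [pvB_loop, dif_neg (by simp)]
    simp
  | succ k ih =>
    intro r hk hgood
    obtain ⟨hpos, hchain⟩ := hgood
    cases hr : r with
    | nil =>
      rw [pvPeel_stop (k + 1) [] (by simp)]
      simp only [pvFlat, List.flatMap_nil]
      rw [pvB_loop, dif_neg (by simp)]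
      simp
    | cons p t =>
      obtain ⟨c, n⟩ := p
      subst hr
      have hn1 : 1 ≤ n := hpos (c, n) List.mem_cons_self
      cases ht : t with
      | nil =>
        -- a single run (c, n)
        rw [pvPeel_stop (k + 1) [(c, n)] (by simp)]
        simp only [List.isEmpty_cons, List.length_cons, List.length_nil, List.headD_cons]
        have hflat : pvFlat [(c, n)] = List.replicate n.toNat c := by
          simp [pvFlat]
        rw [hflat]
        by_cases hne : n = 1
        · subst hne
          rw [show (1 : Int).toNat = 1 from rfl]
          rw [pvB_loop, dif_neg (by simp)]
          simp
        · rw [if_neg hne]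
          obtain ⟨m, hmeq⟩ : ∃ m, n.toNat = m + 2 := ⟨n.toNat - 2, by omega⟩
          have hcons : List.replicate n.toNat c = c :: List.replicate (m + 1) c := by
            rw [hmeq, List.replicate_succ]
          have hsnoc : List.replicate n.toNat c = List.replicate (m + 1) c ++ [c] := by
            rw [hmeq, List.replicate_succ']
          have hg0 : PySem.List.pyGet? (List.replicate n.toNat c) 0 = some c := by
            rw [hcons]; exact PySem.List.pyGet?_zero_cons _ _
          have hg1 : PySem.List.pyGet? (List.replicate n.toNat c) (-1) = some c := by
            rw [hsnoc]; exact PySem.List.pyGet?_neg_one_append_singleton _ _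
          rw [pvB_loop, dif_pos ⟨by simp [hmeq], by rw [hg0, hg1]⟩]
          have hhd : (List.replicate n.toNat c).headD ' ' = c := by
            rw [hcons, List.headD_cons]
          rw [hhd]
          have hstrip := pv_strip_runs c n.toNat 0 [] (by simp) (by simp) (by simp)
          simp only [pvFlat, List.flatMap_nil, List.replicate_zero,
            List.append_nil] at hstrip
          rw [hstrip, pvB_loop, dif_neg (by simp)]
          simp
      | cons q t' =>
        -- at least two runs: decompose the tail from the right
        rcases (show t = [] ∨ ∃ mid p2, t = mid ++ [p2] by
            simpa [List.concat_eq_append] using t.eq_nil_or_concat) with hm2 | ⟨mid, p2, hm2⟩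
        · rw [ht] at hm2; simp at hm2
        · obtain ⟨d, m⟩ := p2
          rw [← ht]
          have hrdec : (c, n) :: t = (c, n) :: mid ++ [(d, m)] := by rw [hm2]; simp
          have hm1 : 1 ≤ m := hpos (d, m) (by rw [hrdec]; simp)
          have hmidpos : ∀ p ∈ mid, 1 ≤ p.2 := fun p hp =>
            hpos p (by rw [hrdec]; simp [hp])
          have hlen2 : 2 ≤ ((c, n) :: t).length := by
            rw [ht]; simp
          -- the ends of the run list
          have hget0 : PySem.List.pyGet? ((c, n) :: t) 0 = some (c, n) :=
            PySem.List.pyGet?_zero_cons _ _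
          have hget1 : PySem.List.pyGet? ((c, n) :: t) (-1) = some (d, m) := by
            rw [hrdec]
            exact PySem.List.pyGet?_neg_one_append_singleton _ _
          -- the chain facts
          have hmap : (((c, n) :: t).map Prod.fst) = c :: (mid.map Prod.fst ++ [d]) := by
            rw [hrdec]; simp
          rw [hmap] at hchain
          have hch1 := List.isChain_cons'.mp hchain
          have hch2 := List.isChain_append.mp hch1.2
          have hlastne : ∀ x ∈ (mid.map Prod.fst).getLast?, x ≠ d := by
            intro x hx
            exact hch2.2.2 x hx d (by simp)
          have hheadne : ∀ x ∈ (mid.map Prod.fst).head?, x ≠ c := by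
            intro x hx
            have hx2 : x ∈ (mid.map Prod.fst ++ [d]).head? := by
              cases hmidm : mid.map Prod.fst with
              | nil => rw [hmidm] at hx; simp at hx
              | cons y ys =>
                rw [hmidm] at hx
                simpa using hx
            exact (hch1.1 x hx2).symm
          -- the flat string and its ends
          have hflat : pvFlat ((c, n) :: t)
              = List.replicate n.toNat c ++ (pvFlat mid ++ List.replicate m.toNat d) := by
            rw [hrdec, List.cons_append, pvFlat_cons, pvFlat_append]
            simp [pvFlat]
          obtain ⟨kn, hkn⟩ : ∃ kn, n.toNat = kn + 1 := ⟨n.toNat - 1, by omega⟩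
          obtain ⟨km, hkm⟩ : ∃ km, m.toNat = km + 1 := ⟨m.toNat - 1, by omega⟩
          have hflcons : pvFlat ((c, n) :: t)
              = c :: (List.replicate kn c ++ (pvFlat mid ++ List.replicate m.toNat d)) := by
            rw [hflat, hkn, List.replicate_succ]
            simp
          have hflsnoc : pvFlat ((c, n) :: t)
              = (List.replicate n.toNat c ++ (pvFlat mid ++ List.replicate km d)) ++ [d] := by
            rw [hflat, hkm, List.replicate_succ']
            simp
          have hfl0 : PySem.List.pyGet? (pvFlat ((c, n) :: t)) 0 = some c := by
            rw [hflcons]; exact PySem.List.pyGet?_zero_cons _ _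
          have hfl1 : PySem.List.pyGet? (pvFlat ((c, n) :: t)) (-1) = some d := by
            rw [hflsnoc]; exact PySem.List.pyGet?_neg_one_append_singleton _ _
          have hfllen : 1 < (pvFlat ((c, n) :: t)).length := by
            rw [hflcons]
            simp only [List.length_cons, List.length_append, List.length_replicate]
            omega
          by_cases hcd : c = d
          · -- matched ends: both sides peel
            subst hcd
            rw [pvPeel_step k ((c, n) :: t) ⟨hlen2, by rw [hget0, hget1]; rfl⟩]
            rw [pv_slice_one_neg_one]
            have hmid : ((c, n) :: t).tail.dropLast = mid := by
              rw [hrdec]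
              simp
            rw [hmid]
            rw [pvB_loop, dif_pos ⟨hfllen, by rw [hfl0, hfl1]⟩]
            have hhd : (pvFlat ((c, n) :: t)).headD ' ' = c := by
              rw [hflcons, List.headD_cons]
            rw [hhd, hflat, pv_strip_runs c n.toNat m.toNat mid hmidpos hheadne hlastne]
            apply ih
            · have : ((c, n) :: t).length = mid.length + 2 := by rw [hrdec]; simp
              omega
            · refine ⟨hmidpos, ?_⟩
              exact (List.isChain_append.mp hch1.2).1
          · -- unmatched ends: both sides stop; lengths agree by the sum lemma
            rw [pvPeel_stop (k + 1) ((c, n) :: t) (by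
              rintro ⟨_, habs⟩
              rw [hget0, hget1] at habs
              simp at habs
              exact hcd habs)]
            rw [pvB_loop, dif_neg (by
              rintro ⟨_, habs⟩
              rw [hfl0, hfl1] at habs
              simp at habs
              exact hcd habs)]
            have hne1 : ((c, n) :: t).length ≠ 1 := by omega
            rw [pv_sum_eq_len _ hpos]
            simp [ht]

-- the reference loop's final length is exactly B's RLE computation
theorem pv_loop_eq_alt (s : String) :
    ((pvB_loop s.toList).length : Int) = minimumLength_alt s := by
  obtain ⟨hgood, hflat⟩ := pvRuns_spec s.toList
  unfold minimumLength_alt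
  rw [← pv_bridge (pvRuns s.toList).length (pvRuns s.toList) le_rfl hgood, hflat]

-- ===== VERDICT (by name: the statement is the Claim_ definition above) =====
theorem minimumLength_spec : Claim_equal_minimumLength := by
  intro s _
  unfold Spec_minimumLength
  rw [pv_A_eq_loop, pv_loop_eq_alt]
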